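-- pv_equiv track=rewrite | github.com/echohound-labs/rise-phoenix-nft | scripts/composite_generator.py | determine_overall_rarity
-- ===== SOURCE A (Python) =====
-- RARITY_MAP = {
--     "Void": "common", "Inferno": "common", "Storm": "common",
--     "Cosmos": "rare", "Golden": "rare", "Blood": "epic", "Frost": "epic", "Eclipse": "legendary",
--     "Classic": "common", "Armored": "common", "Ethereal": "rare", "Shadow": "rare",
--     "Crystal": "epic", "Bone": "epic", "Divine": "legendary",
--     "Spread": "common", "Folded": "common", "Torn": "rare", "Molten": "rare",
--     "Spectral": "epic", "Celestial": "legendary",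
--     "Red": "common", "Blue": "common", "Gold": "rare", "Purple": "rare",
--     "White": "epic", "Black": "legendary",
--     "Blazing": "common", "Calm": "common", "Fierce": "rare", "Ancient": "rare",
--     "Cosmic": "epic", "Void": "legendary",
--     "None": "common", "Lightning": "rare", "Smoke": "common",
--     "Stardust": "epic", "Blood": "epic", "Halo": "legendary",
-- }
--
-- def determine_overall_rarity(traits):
--     """Determine overall rarity tier"""
--     highest = "common"
--     rarity_order = {"common": 0, "rare": 1, "epic": 2, "legendary": 3}
--     for trait_name, value in traits.items():
--         r = RARITY_MAP.get(value, "common")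
--         if rarity_order.get(r, 0) > rarity_order.get(highest, 0):
--             highest = r
--     return highest
-- ===== SOURCE B (Python) =====
-- # Precomputed per-tier key sets (derived once from RARITY_MAP, duplicate keys
-- # resolved as Python does: "Void" -> legendary, "Blood" -> epic); values not in
-- # any set are common.
-- LEGENDARY_VALUES = frozenset({"Void", "Eclipse", "Divine", "Celestial", "Black", "Halo"})
-- EPIC_VALUES = frozenset({"Blood", "Frost", "Crystal", "Bone", "Spectral", "White", "Cosmic", "Stardust"})
-- RARE_VALUES = frozenset({"Cosmos", "Golden", "Ethereal", "Shadow", "Torn", "Molten", "Gold", "Purple", "Fierce", "Ancient", "Lightning"})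
--
-- def determine_overall_rarity(traits):
--     """Determine overall rarity tier"""
--     vals = traits.values()
--     if any(v in LEGENDARY_VALUES for v in vals):
--         return "legendary"
--     if any(v in EPIC_VALUES for v in vals):
--         return "epic"
--     if any(v in RARE_VALUES for v in vals):
--         return "rare"
--     return "common"
-- ===== Notes on version B (the rewrite author's own statement) =====
-- stated objective: simpler
-- what changed: Replaces the running-max scan over a rarity-order dict with precomputed per-tier value sets probed from highest tier to lowest: return the first tier some trait value belongs to, defaulting to common.
import Mathlib
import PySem

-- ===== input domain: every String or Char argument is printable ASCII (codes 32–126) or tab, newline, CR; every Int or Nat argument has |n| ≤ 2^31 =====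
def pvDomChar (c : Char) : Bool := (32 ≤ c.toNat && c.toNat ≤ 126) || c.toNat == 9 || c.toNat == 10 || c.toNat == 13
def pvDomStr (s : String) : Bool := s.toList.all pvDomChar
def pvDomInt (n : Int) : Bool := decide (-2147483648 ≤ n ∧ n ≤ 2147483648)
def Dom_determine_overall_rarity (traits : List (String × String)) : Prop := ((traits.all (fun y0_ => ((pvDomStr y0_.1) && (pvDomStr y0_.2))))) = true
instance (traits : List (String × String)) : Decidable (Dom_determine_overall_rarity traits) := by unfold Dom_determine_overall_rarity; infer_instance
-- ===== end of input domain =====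

-- B replaces the running-max scan over a rarity-order dict with precomputed
-- per-tier value sets probed from highest tier to lowest (objective: simpler).

-- ===== PORT A =====
-- Python's RARITY_MAP dict literal; duplicate keys resolved as Python does
-- (first position, last value: "Void" → "legendary", "Blood" → "epic").
def rarityMap : PySem.Dict String String := PySem.Dict.mk
  [("Void", "legendary"), ("Inferno", "common"), ("Storm", "common"),
   ("Cosmos", "rare"), ("Golden", "rare"), ("Blood", "epic"), ("Frost", "epic"), ("Eclipse", "legendary"),
   ("Classic", "common"), ("Armored", "common"), ("Ethereal", "rare"), ("Shadow", "rare"),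
   ("Crystal", "epic"), ("Bone", "epic"), ("Divine", "legendary"),
   ("Spread", "common"), ("Folded", "common"), ("Torn", "rare"), ("Molten", "rare"),
   ("Spectral", "epic"), ("Celestial", "legendary"),
   ("Red", "common"), ("Blue", "common"), ("Gold", "rare"), ("Purple", "rare"),
   ("White", "epic"), ("Black", "legendary"),
   ("Blazing", "common"), ("Calm", "common"), ("Fierce", "rare"), ("Ancient", "rare"),
   ("Cosmic", "epic"),
   ("None", "common"), ("Lightning", "rare"), ("Smoke", "common"),
   ("Stardust", "epic"), ("Halo", "legendary")]

def rarityOrder : PySem.Dict String Int := PySem.Dict.mk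
  [("common", 0), ("rare", 1), ("epic", 2), ("legendary", 3)]

def determine_overall_rarity (traits : List (String × String)) : String :=
  traits.foldl
    (fun highest p =>
      let r := rarityMap.getD p.2 "common"
      if rarityOrder.getD r 0 > rarityOrder.getD highest 0 then r else highest)
    "common"

-- ===== PORT B =====
def legendaryValues : PySem.Set String :=
  PySem.Set.ofList ["Void", "Eclipse", "Divine", "Celestial", "Black", "Halo"]
def epicValues : PySem.Set String :=
  PySem.Set.ofList ["Blood", "Frost", "Crystal", "Bone", "Spectral", "White", "Cosmic", "Stardust"]
def rareValues : PySem.Set String :=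
  PySem.Set.ofList ["Cosmos", "Golden", "Ethereal", "Shadow", "Torn", "Molten",
                    "Gold", "Purple", "Fierce", "Ancient", "Lightning"]

def determine_overall_rarity_alt (traits : List (String × String)) : String :=
  let vals := traits.map (·.2)
  if vals.any (fun v => legendaryValues.contains v) then "legendary"
  else if vals.any (fun v => epicValues.contains v) then "epic"
  else if vals.any (fun v => rareValues.contains v) then "rare"
  else "common"

-- ===== PRECONDITION & SPEC =====
def Spec_determine_overall_rarity (traits : List (String × String)) (out : String) : Prop := out = determine_overall_rarity_alt traits
instance (traits : List (String × String)) (out : String) : Decidable (Spec_determine_overall_rarity traits out) := by unfold Spec_determine_overall_rarity; infer_instance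

-- ===== CLAIM (what is proved, stated in full; the proofs are below) =====
def Claim_equal_determine_overall_rarity : Prop := ∀ (traits : List (String × String)), Dom_determine_overall_rarity traits → Spec_determine_overall_rarity traits (determine_overall_rarity traits)

-- ===== LEMMAS AND PROOFS =====

-- the tier A looks up for a trait value, and its numeric rank in A
def pvTier (v : String) : String := rarityMap.getD v "common"
def pvSc (v : String) : Int := rarityOrder.getD (pvTier v) 0

-- name of a rank (inverse of rarity_order on {0,1,2,3})
def pvTName (n : Int) : String :=
  if n = 3 then "legendary" else if n = 2 then "epic" else if n = 1 then "rare" else "common"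

-- A's tier lookup agrees with B's precomputed per-tier sets, and rank facts
lemma pvTier_cases (v : String) :
    (pvSc v = 3 ∧ pvTier v = "legendary" ∧ v ∈ legendaryValues ∧ v ∉ epicValues ∧ v ∉ rareValues) ∨
    (pvSc v = 2 ∧ pvTier v = "epic" ∧ v ∉ legendaryValues ∧ v ∈ epicValues ∧ v ∉ rareValues) ∨
    (pvSc v = 1 ∧ pvTier v = "rare" ∧ v ∉ legendaryValues ∧ v ∉ epicValues ∧ v ∈ rareValues) ∨
    (pvSc v = 0 ∧ pvTier v = "common" ∧ v ∉ legendaryValues ∧ v ∉ epicValues ∧ v ∉ rareValues) := by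
  by_cases hv : rarityMap.contains v = true
  · rw [PySem.Dict.contains_iff_mem_keys] at hv
    have hk : rarityMap.keys = ["Void", "Inferno", "Storm", "Cosmos", "Golden", "Blood",
      "Frost", "Eclipse", "Classic", "Armored", "Ethereal", "Shadow", "Crystal", "Bone",
      "Divine", "Spread", "Folded", "Torn", "Molten", "Spectral", "Celestial", "Red",
      "Blue", "Gold", "Purple", "White", "Black", "Blazing", "Calm", "Fierce", "Ancient",
      "Cosmic", "None", "Lightning", "Smoke", "Stardust", "Halo"] := by decide
    rw [hk] at hv
    fin_cases hv <;> decide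
  · have h0 : pvTier v = "common" := by
      unfold pvTier
      exact PySem.Dict.getD_of_not_contains rarityMap "common" (by simpa using hv)
    have hs : pvSc v = 0 := by unfold pvSc; rw [h0]; decide
    have hl : ∀ x ∈ legendaryValues, rarityMap.contains x = true := by decide
    have he : ∀ x ∈ epicValues, rarityMap.contains x = true := by decide
    have hr : ∀ x ∈ rareValues, rarityMap.contains x = true := by decide
    exact Or.inr (Or.inr (Or.inr ⟨hs, h0,
      fun hmem => hv (hl v hmem), fun hmem => hv (he v hmem), fun hmem => hv (hr v hmem)⟩))

-- A's loop in terms of the rank maximum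
lemma foldA (l : List (String × String)) :
    ∀ (h : String),
      (h = "common" ∨ h = "rare" ∨ h = "epic" ∨ h = "legendary") →
      l.foldl (fun highest p =>
        let r := rarityMap.getD p.2 "common"
        if rarityOrder.getD r 0 > rarityOrder.getD highest 0 then r else highest) h
      = pvTName ((l.map (fun p => pvSc p.2)).foldl max (rarityOrder.getD h 0)) := by
  induction l with
  | nil =>
    intro h hh
    rcases hh with rfl | rfl | rfl | rfl <;> rfl
  | cons p rest ih =>
    intro h hh
    simp only [List.foldl_cons, List.map_cons]
    have hstep := pvTier_cases p.2
    have key : (if rarityOrder.getD (rarityMap.getD p.2 "common") 0 > rarityOrder.getD h 0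
        then rarityMap.getD p.2 "common" else h)
        = pvTName (max (rarityOrder.getD h 0) (pvSc p.2)) ∧
        rarityOrder.getD (pvTName (max (rarityOrder.getD h 0) (pvSc p.2))) 0
        = max (rarityOrder.getD h 0) (pvSc p.2) := by
      rcases hstep with ⟨hs, ht, -⟩ | ⟨hs, ht, -⟩ | ⟨hs, ht, -⟩ | ⟨hs, ht, -⟩ <;>
        rcases hh with rfl | rfl | rfl | rfl <;>
        · unfold pvTier at ht
          rw [show rarityOrder.getD (rarityMap.getD p.2 "common") 0 = pvSc p.2 from rfl,
            hs, ht]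
          constructor <;> decide
    have hmem : pvTName (max (rarityOrder.getD h 0) (pvSc p.2)) = "common" ∨
        pvTName (max (rarityOrder.getD h 0) (pvSc p.2)) = "rare" ∨
        pvTName (max (rarityOrder.getD h 0) (pvSc p.2)) = "epic" ∨
        pvTName (max (rarityOrder.getD h 0) (pvSc p.2)) = "legendary" := by
      unfold pvTName; split_ifs <;> simp
    rw [key.1, ih _ hmem, key.2]

lemma fm_init (xs : List Int) (a : Int) : a ≤ xs.foldl max a := by
  induction xs generalizing a with
  | nil => simp
  | cons y ys ih => exact le_trans (le_max_left _ _) (ih _)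

lemma fm_le {xs : List Int} {a x : Int} (hx : x ∈ xs) : x ≤ xs.foldl max a := by
  induction xs generalizing a with
  | nil => cases hx
  | cons y ys ih =>
    rcases List.mem_cons.mp hx with rfl | h
    · exact le_trans (le_max_right a x) (fm_init ys (max a x))
    · exact ih h

lemma fm_mem (xs : List Int) (a : Int) : xs.foldl max a = a ∨ xs.foldl max a ∈ xs := by
  induction xs generalizing a with
  | nil => left; rfl
  | cons y ys ih =>
    simp only [List.foldl_cons]
    rcases ih (max a y) with h | h
    · rcases max_choice a y with hm | hm
      · left; rw [h, hm]
      · right; rw [h, hm]; exact List.mem_cons_self ..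
    · right; exact List.mem_cons_of_mem _ h

-- B's probe of one tier set in terms of the score list
lemma any_iff_score (vs : List String) (s : PySem.Set String) (n : Int)
    (hcorr : ∀ v, v ∈ s ↔ pvSc v = n) :
    vs.any (fun v => s.contains v) = true ↔ n ∈ vs.map pvSc := by
  simp only [List.any_eq_true, PySem.Set.contains_iff, List.mem_map]
  constructor
  · rintro ⟨v, hv, hs⟩; exact ⟨v, hv, (hcorr v).mp hs⟩
  · rintro ⟨v, hv, hn⟩; exact ⟨v, hv, (hcorr v).mpr hn⟩

-- ===== VERDICT (by name: the statement is the Claim_ definition above) =====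
theorem determine_overall_rarity_spec : Claim_equal_determine_overall_rarity := by
  intro traits _
  unfold Spec_determine_overall_rarity determine_overall_rarity determine_overall_rarity_alt
  rw [foldA traits "common" (Or.inl rfl)]
  set vs := traits.map (·.2) with hvs
  have hmap : traits.map (fun p => pvSc p.2) = vs.map pvSc := by
    simp [hvs, List.map_map]
  rw [hmap]
  set m := (vs.map pvSc).foldl max (rarityOrder.getD "common" 0) with hm
  have hz : rarityOrder.getD "common" 0 = 0 := by decide
  have hcorr3 : ∀ v, v ∈ legendaryValues ↔ pvSc v = 3 := by
    intro v; rcases pvTier_cases v with ⟨h, -, h3, -⟩ | ⟨h, -, h3, -⟩ | ⟨h, -, h3, -⟩ | ⟨h, -, h3, -⟩ <;>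
      constructor <;> intro hh <;> simp_all
  have hcorr2 : ∀ v, v ∈ epicValues ↔ pvSc v = 2 := by
    intro v; rcases pvTier_cases v with ⟨h, -, -, h2, -⟩ | ⟨h, -, -, h2, -⟩ | ⟨h, -, -, h2, -⟩ | ⟨h, -, -, h2, -⟩ <;>
      constructor <;> intro hh <;> simp_all
  have hcorr1 : ∀ v, v ∈ rareValues ↔ pvSc v = 1 := by
    intro v; rcases pvTier_cases v with ⟨h, -, -, -, h1⟩ | ⟨h, -, -, -, h1⟩ | ⟨h, -, -, -, h1⟩ | ⟨h, -, -, -, h1⟩ <;>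
      constructor <;> intro hh <;> simp_all
  have hbound : ∀ x ∈ vs.map pvSc, 0 ≤ x ∧ x ≤ 3 := by
    intro x hx
    simp only [List.mem_map] at hx
    obtain ⟨v, _, rfl⟩ := hx
    rcases pvTier_cases v with ⟨h, -⟩ | ⟨h, -⟩ | ⟨h, -⟩ | ⟨h, -⟩ <;> rw [h] <;> omega
  have hm0 : (0 : Int) ≤ m := hz ▸ fm_init _ _
  have hmemle : ∀ x ∈ vs.map pvSc, x ≤ m := fun x hx => fm_le hx
  have hmeq : ∀ n : Int, 1 ≤ n → (m = n ↔ (n ∈ vs.map pvSc ∧ ∀ x ∈ vs.map pvSc, x ≤ n)) := by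
    intro n hn
    constructor
    · intro h
      rcases fm_mem (vs.map pvSc) (rarityOrder.getD "common" 0) with h' | h'
      · rw [← hm] at h'; rw [hz] at h'; omega
      · rw [← hm] at h'; exact ⟨h ▸ h', fun x hx => h ▸ hmemle x hx⟩
    · rintro ⟨hin, hub⟩
      have := hmemle _ hin
      have := hub m
      rcases fm_mem (vs.map pvSc) (rarityOrder.getD "common" 0) with h' | h' <;>
        rw [← hm] at h'
      · rw [hz] at h'; have := hmemle _ hin; omega
      · have := hub _ h'; omega
  simp only [any_iff_score vs _ 3 hcorr3, any_iff_score vs _ 2 hcorr2, any_iff_score vs _ 1 hcorr1]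
  by_cases h3 : (3 : Int) ∈ vs.map pvSc
  · rw [if_pos h3]
    have : m = 3 := (hmeq 3 (by omega)).mpr ⟨h3, fun x hx => (hbound x hx).2⟩
    rw [this]; rfl
  · rw [if_neg h3]
    have hub3 : ∀ x ∈ vs.map pvSc, x ≤ 2 := by
      intro x hx
      have hb := (hbound x hx).2
      rcases eq_or_lt_of_le hb with h | h
      · exact absurd (h ▸ hx) h3
      · omega
    by_cases h2 : (2 : Int) ∈ vs.map pvSc
    · rw [if_pos h2]
      have : m = 2 := (hmeq 2 (by omega)).mpr ⟨h2, hub3⟩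
      rw [this]; rfl
    · rw [if_neg h2]
      have hub2 : ∀ x ∈ vs.map pvSc, x ≤ 1 := by
        intro x hx
        have hb := hub3 x hx
        rcases eq_or_lt_of_le hb with h | h
        · exact absurd (h ▸ hx) h2
        · omega
      by_cases h1 : (1 : Int) ∈ vs.map pvSc
      · rw [if_pos h1]
        have : m = 1 := (hmeq 1 (by omega)).mpr ⟨h1, hub2⟩
        rw [this]; rfl
      · rw [if_neg h1]
        have hub1 : ∀ x ∈ vs.map pvSc, x ≤ 0 := by
          intro x hx
          have hb := hub2 x hx
          rcases eq_or_lt_of_le hb with h | h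
          · exact absurd (h ▸ hx) h1
          · omega
        have : m = 0 := by
          rcases fm_mem (vs.map pvSc) (rarityOrder.getD "common" 0) with h' | h' <;>
            rw [← hm] at h'
          · rw [hz] at h'; exact h'
          · have := hub1 _ h'; omega
        rw [this]; rfl
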